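-- pv_equiv track=rewrite | github.com/FanchenBao/leetcode | 2023_12_challenge/2023_12_28.py | getLengthOfOptimalCompression
-- ===== SOURCE A (Python) =====
-- import math
-- from functools import lru_cache
-- from collections import Counter
--
-- def getLengthOfOptimalCompression(s: str, k: int) -> int:
--     """
--     LeetCode 1531
--
--     A nightmare problem, and I failed to solve it again. Just read
--     the two comments I made to understand the very very brilliant
--     solution
--
--     https://leetcode.com/problems/string-compression-ii/discuss/756022/C++-Top-Down-DP-with-explanation-64ms-short-and-clear/1645542
--
--     O(NK), 2318 ms, faster than 46.00%
--     """
--     def encoded_len(l: int) -> int: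
--         if l == 1:
--             return 1
--         if l < 10:
--             return 2
--         if l < 100:
--             return 3
--         return 4
--
--     @lru_cache(maxsize=None)
--     def dp(idx: int, rem: int) -> int:
--         if rem < 0:  # cannot remove anymore
--             return math.inf
--         if len(s) - idx <= rem:  # we can remove everything
--             return 0
--         # try to go through all possible ways to form the first
--         # group in the final solution by removing all the letters
--         # from idx to some i such that the remaining letters are
--         # all the same but with different lengths
--         max_count = 0
--         counter = Counter()
--         res = math.inf
--         for i in range(idx, len(s)):
--             counter[s[i]] += 1
--             max_count = max(max_count, counter[s[i]])
--             to_remove = i - idx + 1 - max_count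
--             res = min(res, encoded_len(max_count) + dp(i + 1, rem - to_remove))
--         return res
--
--     return dp(0, k)
-- ===== SOURCE B (Python) =====
-- def getLengthOfOptimalCompression(s: str, k: int) -> int:
--     """Bottom-up tabulation of the same DP (dp[idx][rem] = min encoded length of
--     s[idx:] after removing at most rem chars), replacing A's memoized recursion.
--     Uses the finite sentinel n+1 instead of math.inf (every real state value is <= n)."""
--
--     def encoded_len(l: int) -> int:
--         if l == 1:
--             return 1
--         if l < 10:
--             return 2
--         if l < 100:
--             return 3
--         return 4
--
--     n = len(s)
--     if n <= k:
--         return 0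
--     INF = n + 1
--     dp = [[0] * (k + 1) for _ in range(n + 1)]
--     for idx in range(n - 1, -1, -1):
--         for rem in range(k + 1):
--             if n - idx <= rem:
--                 continue  # dp[idx][rem] stays 0: everything can be removed
--             counter = {}
--             max_count = 0
--             res = INF
--             for i in range(idx, n):
--                 c = s[i]
--                 cnt = counter.get(c, 0) + 1
--                 counter[c] = cnt
--                 if cnt > max_count:
--                     max_count = cnt
--                 to_remove = i - idx + 1 - max_count
--                 if to_remove <= rem:
--                     cand = encoded_len(max_count) + dp[i + 1][rem - to_remove]
--                     if cand < res:
--                         res = cand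
--             dp[idx][rem] = res
--     return dp[0][k]
-- ===== Notes on version B (the rewrite author's own statement) =====
-- stated objective: alternative
-- what changed: Replaces A's memoized top-down recursion (lru_cache dp(idx,rem)) by bottom-up tabulation: a dp[idx][rem] table filled from idx=n down to 0 with the same inner grouping loop, math.inf replaced by the finite sentinel n+1 and inf-producing candidates skipped instead of added.
-- outside the precondition, e.g. on getLengthOfOptimalCompression('ab', -1): A returns inf, B raises IndexError
import Mathlib
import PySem

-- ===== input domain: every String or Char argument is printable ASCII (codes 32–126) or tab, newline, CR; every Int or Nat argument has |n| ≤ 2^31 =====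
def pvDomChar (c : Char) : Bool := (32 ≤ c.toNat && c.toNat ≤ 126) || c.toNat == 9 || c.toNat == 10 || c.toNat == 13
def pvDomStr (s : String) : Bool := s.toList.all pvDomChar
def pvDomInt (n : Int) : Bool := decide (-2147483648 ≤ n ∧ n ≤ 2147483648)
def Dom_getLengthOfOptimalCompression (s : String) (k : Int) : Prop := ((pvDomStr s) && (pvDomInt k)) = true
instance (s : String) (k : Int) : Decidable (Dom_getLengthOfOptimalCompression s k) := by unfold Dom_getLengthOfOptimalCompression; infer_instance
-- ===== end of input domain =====

-- B replaces A's memoized recursion by bottom-up tabulation of the same DP (objective: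
-- alternative decomposition); math.inf is represented in both ports by the finite sentinel
-- len(s)+1, exact on Pre_ (k ≥ 0), where every value A can return is ≤ len(s).

-- ===== PORT A =====
def pvEncLen (l : Int) : Int :=
  if l = 1 then 1 else if l < 10 then 2 else if l < 100 then 3 else 4

-- A's inner `for i in range(idx, len(s))` loop; `dp` is the recursion it calls (steps = len - i).
def pvLoopA (cs : List Char) (dp : Nat → Int → Int) (idx : Nat) (rem : Int) :
    Nat → Nat → PySem.Dict Char Int → Int → Int → Int
  | 0, _, _, _, res => res
  | steps + 1, i, counter, maxc, res =>
      let c := (PySem.List.pyGet? cs (i : Int)).getD ' '   -- s[i]; i < len(s) at every call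
      let counter' := counter.modify c 0 (· + 1)           -- counter[s[i]] += 1
      let maxc' := max maxc (counter'.getD c 0)            -- max_count = max(max_count, counter[s[i]])
      let to_remove := (i : Int) - (idx : Int) + 1 - maxc'
      let cand := pvEncLen maxc' + dp (i + 1) (rem - to_remove)
      pvLoopA cs dp idx rem steps (i + 1) counter' maxc' (min res cand)

-- A's dp(idx, rem); math.inf ↦ sentinel len+1 (exact on Pre_: see header comment); fuel makes
-- the recursion structural (fuel ≥ len - idx at every call, so the fuel-0 else-branch is unreachable).
def pvDpA (cs : List Char) : Nat → Nat → Int → Int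
  | 0, idx, rem =>
      if rem < 0 then (cs.length : Int) + 1
      else if (cs.length : Int) - (idx : Int) ≤ rem then 0
      else 0
  | f + 1, idx, rem =>
      if rem < 0 then (cs.length : Int) + 1
      else if (cs.length : Int) - (idx : Int) ≤ rem then 0
      else pvLoopA cs (pvDpA cs f) idx rem (cs.length - idx) idx PySem.Dict.empty 0 ((cs.length : Int) + 1)

def getLengthOfOptimalCompression (s : String) (k : Int) : Int :=
  pvDpA s.toList s.toList.length 0 k

-- ===== PORT B =====
-- B's inner loop over i (steps = len - i); `below` holds the already-computed rows idx+1 .. len,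
-- so Python's dp[i+1][rem-to_remove] is below[i-idx][rem-to_remove].
def pvLoopB (cs : List Char) (below : List (List Int)) (idx : Nat) (rem : Int) :
    Nat → Nat → PySem.Dict Char Int → Int → Int → Int
  | 0, _, _, _, res => res
  | steps + 1, i, counter, maxc, res =>
      let c := (PySem.List.pyGet? cs (i : Int)).getD ' '   -- s[i]
      let cnt := counter.getD c 0 + 1                      -- counter.get(c, 0) + 1
      let counter' := counter.insert c cnt
      let maxc' := if maxc < cnt then cnt else maxc
      let tr := (i : Int) - (idx : Int) + 1 - maxc'
      let res' :=
        if tr ≤ rem then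
          let cand := pvEncLen maxc' +
            PySem.List.pyGetD (PySem.List.pyGetD below ((i : Int) - (idx : Int)) []) (rem - tr) 0
          if cand < res then cand else res
        else res
      pvLoopB cs below idx rem steps (i + 1) counter' maxc' res'

-- row of the table for index idx: [dp[idx][rem] for rem in range(k+1)]
def pvRowB (cs : List Char) (k : Int) (below : List (List Int)) (idx : Nat) : List Int :=
  (PySem.List.pyRange 0 (k + 1) 1).map (fun rem =>
    if (cs.length : Int) - (idx : Int) ≤ rem then 0
    else pvLoopB cs below idx rem (cs.length - idx) idx PySem.Dict.empty 0 ((cs.length : Int) + 1))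

-- the `for idx in range(n-1, -1, -1)` loop: prepend row idx to the rows idx+1 .. len
def pvBuildB (cs : List Char) (k : Int) : Nat → List (List Int) → List (List Int)
  | 0, rows => rows
  | m + 1, rows => pvBuildB cs k m (pvRowB cs k rows m :: rows)

def getLengthOfOptimalCompression_alt (s : String) (k : Int) : Int :=
  let cs := s.toList
  let n := cs.length
  if (n : Int) ≤ k then 0
  else
    let table := pvBuildB cs k n [(PySem.List.pyRange 0 (k + 1) 1).map (fun _ => (0 : Int))]
    PySem.List.pyGetD (PySem.List.pyGetD table 0 []) k 0

-- ===== PRECONDITION & SPEC =====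
-- Pre_ excludes k < 0, where Python A returns math.inf — a float, not a value of the declared
-- int return type (B raises IndexError there).
def Pre_getLengthOfOptimalCompression (s : String) (k : Int) : Prop := 0 ≤ k
instance (s : String) (k : Int) : Decidable (Pre_getLengthOfOptimalCompression s k) := by unfold Pre_getLengthOfOptimalCompression; infer_instance

def pvWitness_getLengthOfOptimalCompression : String × Int := ("aabcc", 2)

def Spec_getLengthOfOptimalCompression (s : String) (k : Int) (out : Int) : Prop := out = getLengthOfOptimalCompression_alt s k
instance (s : String) (k : Int) (out : Int) : Decidable (Spec_getLengthOfOptimalCompression s k out) := by unfold Spec_getLengthOfOptimalCompression; infer_instance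

-- ===== CLAIM (what is proved, stated in full; the proofs are below) =====
def Claim_equal_getLengthOfOptimalCompression : Prop := ∀ (s : String) (k : Int), Dom_getLengthOfOptimalCompression s k → Pre_getLengthOfOptimalCompression s k → Spec_getLengthOfOptimalCompression s k (getLengthOfOptimalCompression s k)

-- ===== LEMMAS AND PROOFS =====

theorem pvEncLen_pos (l : Int) : 1 ≤ pvEncLen l := by
  unfold pvEncLen; split_ifs <;> omega

-- pvDpA does not look at its fuel on the two base branches
theorem pvDpA_base (cs : List Char) (f : Nat) (idx : Nat) (rem : Int)
    (h : rem < 0 ∨ (cs.length : Int) - (idx : Int) ≤ rem) :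
    pvDpA cs f idx rem = if rem < 0 then (cs.length : Int) + 1 else 0 := by
  cases f <;> rcases h with h | h <;> simp [pvDpA, h]

-- the loop only depends on dp through its values at the indices it visits
theorem pvLoopA_congr (cs : List Char) (dp1 dp2 : Nat → Int → Int) (idx : Nat) (rem : Int)
    (H : ∀ i' rem', idx ≤ i' → dp1 (i' + 1) rem' = dp2 (i' + 1) rem') :
    ∀ steps i counter maxc res, idx ≤ i →
      pvLoopA cs dp1 idx rem steps i counter maxc res
        = pvLoopA cs dp2 idx rem steps i counter maxc res := by
  intro steps
  induction steps with
  | zero => intro i counter maxc res _; rfl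
  | succ steps ih =>
      intro i counter maxc res hi
      simp only [pvLoopA, H i _ hi]
      exact ih (i + 1) _ _ _ (by omega)

-- fuel irrelevance: any fuel ≥ len - idx computes the same value
theorem pvDpA_fuel (cs : List Char) :
    ∀ f g idx rem, cs.length ≤ f + idx → cs.length ≤ g + idx →
      pvDpA cs f idx rem = pvDpA cs g idx rem := by
  intro f
  induction f with
  | zero =>
      intro g idx rem hf _
      have hb : rem < 0 ∨ (cs.length : Int) - (idx : Int) ≤ rem := by
        rcases lt_or_ge rem 0 with h | h
        · exact Or.inl h
        · right; omega
      rw [pvDpA_base cs 0 idx rem hb, pvDpA_base cs g idx rem hb]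
  | succ f ih =>
      intro g idx rem _ hg
      by_cases h1 : rem < 0
      · rw [pvDpA_base cs (f + 1) idx rem (Or.inl h1), pvDpA_base cs g idx rem (Or.inl h1)]
      by_cases h2 : (cs.length : Int) - (idx : Int) ≤ rem
      · rw [pvDpA_base cs (f + 1) idx rem (Or.inr h2), pvDpA_base cs g idx rem (Or.inr h2)]
      have hidx : idx < cs.length := by omega
      obtain ⟨g', rfl⟩ : ∃ g', g = g' + 1 := ⟨g - 1, by omega⟩
      simp only [pvDpA, if_neg h1, if_neg h2]
      exact pvLoopA_congr cs (pvDpA cs f) (pvDpA cs g') idx rem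
        (fun i' rem' hi' => ih g' (i' + 1) rem' (by omega) (by omega)) _ idx _ _ _ (le_refl idx)


theorem pvDpA_succ (cs : List Char) (f : Nat) (idx : Nat) (rem : Int)
    (h1 : ¬ rem < 0) (h2 : ¬ ((cs.length : Int) - (idx : Int) ≤ rem)) :
    pvDpA cs (f + 1) idx rem
      = pvLoopA cs (pvDpA cs f) idx rem (cs.length - idx) idx PySem.Dict.empty 0 ((cs.length : Int) + 1) := by
  simp [pvDpA, h1, h2]

-- the table invariant: rows = the rows m, m+1, …, len of the DP table
def pvInv (cs : List Char) (k : Int) (m : Nat) (rows : List (List Int)) : Prop :=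
  rows.length = cs.length + 1 - m ∧
  ∀ (j : Nat) (r : Int), j < rows.length → 0 ≤ r → r ≤ k →
    PySem.List.pyGetD (PySem.List.pyGetD rows (j : Int) []) r 0
      = pvDpA cs cs.length (m + j) r

-- the two inner loops agree, stepping in lockstep
theorem pvLoopAB (cs : List Char) (below : List (List Int)) (k : Int) (idx : Nat) (rem : Int)
    (_hrem0 : 0 ≤ rem) (hremk : rem ≤ k)
    (hInv : pvInv cs k (idx + 1) below) :
    ∀ steps i (cA cB : PySem.Dict Char Int) maxc res,
      steps + i = cs.length → idx ≤ i →
      (∀ ch, cA.getD ch 0 = cB.getD ch 0) →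
      (∀ ch, 0 ≤ cB.getD ch 0 ∧ cB.getD ch 0 ≤ (i : Int) - (idx : Int)) →
      0 ≤ maxc → maxc ≤ (i : Int) - (idx : Int) →
      res ≤ (cs.length : Int) + 1 →
      pvLoopA cs (pvDpA cs (cs.length - 1)) idx rem steps i cA maxc res
        = pvLoopB cs below idx rem steps i cB maxc res := by
  intro steps
  induction steps with
  | zero => intro i cA cB maxc res _ _ _ _ _ _ _; rfl
  | succ steps ih =>
    intro i cA cB maxc res hsi hi hcc hbnd hm0 hmb hres
    have hiLt : i < cs.length := by omega
    simp only [pvLoopA, pvLoopB]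
    set c := (PySem.List.pyGet? cs (i : Int)).getD ' ' with hc
    have hcnt : (cA.modify c 0 (· + 1)).getD c 0 = cB.getD c 0 + 1 := by
      rw [PySem.Dict.getD_modify_self, hcc]
    set cnt := cB.getD c 0 + 1 with hcntdef
    have hmax : max maxc ((cA.modify c 0 (· + 1)).getD c 0)
        = (if maxc < cnt then cnt else maxc) := by
      rw [hcnt, max_def]; split_ifs <;> omega
    rw [hmax]
    set mc := if maxc < cnt then cnt else maxc with hmc
    have hmc0 : 0 ≤ mc := by rw [hmc]; split_ifs <;> [exact le_trans (by omega) (le_refl _); exact hm0]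
    have hmcle : mc ≤ (i : Int) - (idx : Int) + 1 := by
      have := (hbnd c).2
      rw [hmc]; split_ifs <;> omega
    set tr := (i : Int) - (idx : Int) + 1 - mc with htrdef
    have htr0 : 0 ≤ tr := by omega
    have hcc' : ∀ ch, (cA.modify c 0 (· + 1)).getD ch 0 = (cB.insert c cnt).getD ch 0 := by
      intro ch
      rw [PySem.Dict.getD_modify, PySem.Dict.getD_insert]
      split_ifs with hch
      · subst hch; rw [hcc]
      · exact hcc ch
    have hbnd' : ∀ ch, 0 ≤ (cB.insert c cnt).getD ch 0 ∧
        (cB.insert c cnt).getD ch 0 ≤ ((i + 1 : Nat) : Int) - (idx : Int) := by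
      intro ch
      rw [PySem.Dict.getD_insert]
      have h1 := (hbnd ch).1
      have h2 := (hbnd ch).2
      have h3 := (hbnd c).1
      have h4 := (hbnd c).2
      split_ifs <;> push_cast <;> omega
    have hmcb' : mc ≤ ((i + 1 : Nat) : Int) - (idx : Int) := by push_cast; omega
    by_cases htr : tr ≤ rem
    · -- both take the candidate, and the candidates are equal
      have hdp : pvDpA cs (cs.length - 1) (i + 1) (rem - tr) = pvDpA cs cs.length (i + 1) (rem - tr) :=
        pvDpA_fuel cs (cs.length - 1) cs.length (i + 1) (rem - tr) (by omega) (by omega)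
      have hj : ((i : Int) - (idx : Int)) = ((i - idx : Nat) : Int) := by push_cast [hi]; ring
      have hlook : PySem.List.pyGetD (PySem.List.pyGetD below ((i : Int) - (idx : Int)) []) (rem - tr) 0
          = pvDpA cs cs.length (i + 1) (rem - tr) := by
        rw [hj]
        have hjlt : i - idx < below.length := by
          rw [hInv.1]; omega
        have := hInv.2 (i - idx) (rem - tr) hjlt (by omega) (by omega)
        rw [this]
        congr 1
        omega
      rw [if_pos htr, hdp, ← hlook]
      set cand := pvEncLen mc + PySem.List.pyGetD (PySem.List.pyGetD below ((i : Int) - (idx : Int)) []) (rem - tr) 0 with hcand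
      have hminif : min res cand = if cand < res then cand else res := by
        rw [min_def]; split_ifs <;> omega
      rw [hminif]
      refine ih (i + 1) _ _ mc _ (by omega) (by omega) hcc' hbnd' hmc0 hmcb' ?_
      split_ifs <;> omega
    · -- A adds an inf-tagged candidate that loses the min; B skips
      have hneg : rem - tr < 0 := by omega
      rw [if_neg htr]
      rw [pvDpA_base cs (cs.length - 1) (i + 1) (rem - tr) (Or.inl hneg), if_pos hneg]
      have hek := pvEncLen_pos mc
      have : min res (pvEncLen mc + ((cs.length : Int) + 1)) = res := by
        rw [min_def]; split_ifs <;> omega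
      rw [this]
      exact ih (i + 1) _ _ mc _ (by omega) (by omega) hcc' hbnd' hmc0 hmcb' hres

-- the computed row is row idx of the DP table
theorem pvRowB_correct (cs : List Char) (k : Int) (below : List (List Int)) (idx : Nat)
    (hidx : idx < cs.length) (hInv : pvInv cs k (idx + 1) below) :
    ∀ r : Int, 0 ≤ r → r ≤ k →
      PySem.List.pyGetD (pvRowB cs k below idx) r 0 = pvDpA cs cs.length idx r := by
  intro r hr0 hrk
  unfold pvRowB
  rw [PySem.List.pyGetD_map_pyRange_of_nonneg _ (k + 1) r 0 hr0 (by omega)]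
  by_cases hb : (cs.length : Int) - (idx : Int) ≤ r
  · rw [if_pos hb, pvDpA_base cs cs.length idx r (Or.inr hb), if_neg (by omega)]
  · rw [if_neg hb]
    have hfuel : pvDpA cs cs.length idx r = pvDpA cs (cs.length - 1 + 1) idx r :=
      pvDpA_fuel cs cs.length (cs.length - 1 + 1) idx r (by omega) (by omega)
    rw [hfuel, pvDpA_succ cs (cs.length - 1) idx r (by omega) hb]
    exact (pvLoopAB cs below k idx r hr0 hrk hInv (cs.length - idx) idx
      PySem.Dict.empty PySem.Dict.empty 0 ((cs.length : Int) + 1) (by omega) (le_refl idx)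
      (fun ch => rfl) (fun ch => by rw [PySem.Dict.getD_empty]; omega)
      (le_refl 0) (by omega) (le_refl _)).symm

theorem pvBuildB_correct (cs : List Char) (k : Int) :
    ∀ m rows, m ≤ cs.length → pvInv cs k m rows → pvInv cs k 0 (pvBuildB cs k m rows) := by
  intro m
  induction m with
  | zero => intro rows _ h; exact h
  | succ m ih =>
    intro rows hm hInv
    refine ih (pvRowB cs k rows m :: rows) (by omega) ?_
    constructor
    · simp [hInv.1]; omega
    · intro j r hj hr0 hrk
      cases j with
      | zero =>
        have h0 : PySem.List.pyGetD (pvRowB cs k rows m :: rows) ((0 : Nat) : Int) []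
            = pvRowB cs k rows m := by
          simp [PySem.List.pyGetD]
        rw [h0, pvRowB_correct cs k rows m (by omega) hInv r hr0 hrk]
        norm_num
      | succ j =>
        have hcast : ((j + 1 : Nat) : Int) = (j : Int) + 1 := by push_cast; ring
        rw [show PySem.List.pyGetD (pvRowB cs k rows m :: rows) ((j + 1 : Nat) : Int) []
              = PySem.List.pyGetD rows (j : Int) [] from by
          simp only [PySem.List.pyGetD, hcast, PySem.List.pyGet?_cons_succ]]
        have hjlt : j < rows.length := by
          simp at hj; omega
        rw [hInv.2 j r hjlt hr0 hrk]
        congr 1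
        omega

-- ===== VERDICT (by name: the statement is the Claim_ definition above) =====
theorem getLengthOfOptimalCompression_spec : Claim_equal_getLengthOfOptimalCompression := by
  intro s k _ hk
  unfold Pre_getLengthOfOptimalCompression at hk
  unfold Spec_getLengthOfOptimalCompression getLengthOfOptimalCompression getLengthOfOptimalCompression_alt
  simp only []
  by_cases hnk : ((s.toList.length : Int)) ≤ k
  · rw [if_pos hnk, pvDpA_base s.toList s.toList.length 0 k (Or.inr (by push_cast; omega)),
      if_neg (by omega)]
  · rw [if_neg hnk]
    have hbase : pvInv s.toList k s.toList.length
        [(PySem.List.pyRange 0 (k + 1) 1).map (fun _ => (0 : Int))] := by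
      constructor
      · simp
      · intro j r hj hr0 hrk
        have hj0 : j = 0 := by simpa using hj
        subst hj0
        have h0 : PySem.List.pyGetD [(PySem.List.pyRange 0 (k + 1) 1).map (fun _ => (0 : Int))] ((0 : Nat) : Int) []
            = (PySem.List.pyRange 0 (k + 1) 1).map (fun _ => (0 : Int)) := by
          simp [PySem.List.pyGetD]
        rw [h0, PySem.List.pyGetD_map_pyRange_of_nonneg _ (k + 1) r 0 hr0 (by omega)]
        rw [pvDpA_base s.toList s.toList.length (s.toList.length + 0) r (Or.inr (by push_cast; omega)),
          if_neg (by omega)]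
    have hInv0 := pvBuildB_correct s.toList k s.toList.length _ (le_refl _) hbase
    have := hInv0.2 0 k (by rw [hInv0.1]; omega) hk (le_refl k)
    rw [Nat.cast_zero] at this
    rw [this]
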